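-- pv_equiv track=rewrite | github.com/erp12/pyshgp | examples/TerpreT/binary_decrement.py | binary_decrement
-- ===== SOURCE A (Python) =====
-- def binary_decrement(bitstr):
--     bits = list(bitstr[::-1])
--     for i, bit in enumerate(bits):
--         if bit:
--             bits[i] = False
--             break
--         else:
--             bits[i] = True
--     return bits[::-1]
-- ===== SOURCE B (Python) =====
-- def binary_decrement(bitstr):
--     n = len(bitstr)
--     value = 0
--     for b in bitstr:
--         value = value * 2 + (1 if b else 0)
--     r = (value - 1) % (2 ** n)
--     bits = []
--     for _ in range(n):
--         bits.append(r % 2 == 1)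
--         r //= 2
--     return bits[::-1]
-- ===== Notes on version B (the rewrite author's own statement) =====
-- stated objective: alternative
-- what changed: Replaces the ripple-borrow loop over the reversed bit list by an arithmetic decrement: fold the bits into an integer, subtract 1 modulo 2**n, and re-extract the bits by repeated divmod.
import Mathlib
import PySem

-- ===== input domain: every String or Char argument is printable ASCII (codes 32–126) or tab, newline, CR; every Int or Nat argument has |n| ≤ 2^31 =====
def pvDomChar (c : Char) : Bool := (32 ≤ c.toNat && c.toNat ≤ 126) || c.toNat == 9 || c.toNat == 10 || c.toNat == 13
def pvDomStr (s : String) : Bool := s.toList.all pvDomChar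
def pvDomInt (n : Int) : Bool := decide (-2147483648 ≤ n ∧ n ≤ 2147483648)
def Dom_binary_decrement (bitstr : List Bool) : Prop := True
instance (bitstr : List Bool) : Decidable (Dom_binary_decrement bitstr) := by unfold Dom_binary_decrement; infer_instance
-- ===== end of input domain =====

-- ===== PORT A =====
-- Header: B replaces A's ripple-borrow loop by an arithmetic decrement modulo 2^n (alternative algorithm, same cost).
-- 'bitstr[::-1]' is List.reverse (PySem.List.slice?_none_none_neg_one); the enumerate-loop with break is the
-- structural recursion rippleA over the same list state (flip leading Falses; first True becomes False and break).
def rippleA : List Bool → List Bool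
  | [] => []
  | b :: bs => if b then false :: bs else true :: rippleA bs

def binary_decrement (bitstr : List Bool) : List Bool :=
  (rippleA bitstr.reverse).reverse

-- ===== PORT B =====
-- 'for b in bitstr: value = value*2 + (1 if b else 0)' is the foldl; 'r = (value-1) % 2**n' uses Python mod;
-- 'for _ in range(n)' is a fold over List.range n carrying the state (bits, r); 'bits[::-1]' is List.reverse.
def binary_decrement_alt (bitstr : List Bool) : List Bool :=
  let n := bitstr.length
  let value := bitstr.foldl (fun v b => v * 2 + (if b then (1 : Int) else 0)) 0
  let r := PySem.Int.mod (value - 1) (2 ^ n)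
  let st := (List.range n).foldl
    (fun (st : List Bool × Int) _ => (st.1 ++ [PySem.Int.mod st.2 2 == 1], PySem.Int.floordiv st.2 2))
    ([], r)
  st.1.reverse

-- ===== PRECONDITION & SPEC =====
def Spec_binary_decrement (bitstr : List Bool) (out : List Bool) : Prop := out = binary_decrement_alt bitstr
instance (bitstr : List Bool) (out : List Bool) : Decidable (Spec_binary_decrement bitstr out) := by unfold Spec_binary_decrement; infer_instance

-- ===== CLAIM (what is proved, stated in full; the proofs are below) =====
def Claim_equal_binary_decrement : Prop := ∀ (bitstr : List Bool), Dom_binary_decrement bitstr → Spec_binary_decrement bitstr (binary_decrement bitstr)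

-- ===== LEMMAS AND PROOFS =====

-- value of a bit list, least-significant bit first
def lsbVal : List Bool → Nat
  | [] => 0
  | b :: bs => (if b then 1 else 0) + 2 * lsbVal bs

-- bit extraction, least-significant bit first (proof-side normal form of B's extraction loop)
def Tn : Nat → Int → List Bool
  | 0, _ => []
  | k + 1, r => (r % 2 == 1) :: Tn k (r / 2)

theorem lsbVal_lt (l : List Bool) : lsbVal l < 2 ^ l.length := by
  induction l with
  | nil => simp [lsbVal]
  | cons b bs ih => simp only [lsbVal, List.length_cons, pow_succ]; split <;> omega

theorem foldl_msb (l : List Bool) (a : Int) :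
    l.foldl (fun v b => v * 2 + (if b then (1 : Int) else 0)) a
      = a * 2 ^ l.length + l.foldl (fun v b => v * 2 + (if b then (1 : Int) else 0)) 0 := by
  induction l generalizing a with
  | nil => simp
  | cons b bs ih =>
      simp only [List.foldl_cons, List.length_cons]
      rw [ih (a * 2 + _), ih (0 * 2 + _)]
      ring

theorem foldl_eq_lsbVal_reverse (l : List Bool) :
    l.foldl (fun v b => v * 2 + (if b then (1 : Int) else 0)) 0 = (lsbVal l.reverse : Int) := by
  induction l with
  | nil => simp [lsbVal]
  | cons b bs ih =>
      simp only [List.foldl_cons, List.reverse_cons]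
      rw [foldl_msb, ih]
      have h : lsbVal (bs.reverse ++ [b])
          = lsbVal bs.reverse + (if b then 1 else 0) * 2 ^ bs.length := by
        rw [← List.length_reverse (as := bs)]
        generalize bs.reverse = m
        induction m with
        | nil => cases b <;> simp [lsbVal]
        | cons c cs ih2 =>
            simp only [List.cons_append, lsbVal, ih2, List.length_cons, pow_succ]; ring
      rw [h]
      cases b <;> push_cast <;> ring

theorem Tn_two_mul (k : Nat) (s : Int) : Tn (k + 1) (2 * s) = false :: Tn k s := by
  simp [Tn, Int.mul_emod_right, Int.mul_ediv_cancel_left _ (by norm_num : (2:Int) ≠ 0)]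

theorem Tn_two_mul_add_one (k : Nat) (s : Int) : Tn (k + 1) (2 * s + 1) = true :: Tn k s := by
  have h1 : (2 * s + 1) % 2 = 1 := by omega
  have h2 : (2 * s + 1) / 2 = s := by omega
  simp [Tn, h1, h2]

theorem Tn_lsbVal (l : List Bool) : Tn l.length (lsbVal l : Int) = l := by
  induction l with
  | nil => simp [Tn]
  | cons b bs ih =>
      cases b
      · have : (lsbVal (false :: bs) : Int) = 2 * (lsbVal bs : Int) := by
          simp only [lsbVal]; push_cast; ring
        rw [List.length_cons, this, Tn_two_mul, ih]
      · have : (lsbVal (true :: bs) : Int) = 2 * (lsbVal bs : Int) + 1 := by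
          simp only [lsbVal]; push_cast; ring
        rw [List.length_cons, this, Tn_two_mul_add_one, ih]

theorem emod_two_mul_pow (k : Nat) (v : Int) :
    (2 * v) % (2 ^ (k + 1)) = 2 * (v % 2 ^ k) := by
  rw [pow_succ, mul_comm ((2:Int) ^ k) 2]
  exact Int.mul_emod_mul_of_pos _ _ (by norm_num)

theorem emod_two_mul_add_one_pow (k : Nat) (v : Int) :
    (2 * v - 1) % (2 ^ (k + 1)) = 2 * ((v - 1) % 2 ^ k) + 1 := by
  have h := emod_two_mul_pow k (v - 1)
  have hp : (0 : Int) < 2 ^ k := by positivity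
  have hlt : (v - 1) % 2 ^ k < 2 ^ k := Int.emod_lt_of_pos _ hp
  have hge : 0 ≤ (v - 1) % 2 ^ k := Int.emod_nonneg _ (by positivity)
  have e : 2 * v - 1 = 2 * (v - 1) + 1 := by ring
  have hps : (2 : Int) ^ (k + 1) = 2 ^ k * 2 := pow_succ 2 k
  rw [e, Int.add_emod, h, hps]
  have hq := hlt
  generalize ((v - 1) % 2 ^ k) = q at hlt hge ⊢
  generalize hpk : (2 : Int) ^ k = p at hlt hp ⊢
  have h1 : (1 : Int) % (p * 2) = 1 := Int.emod_eq_of_lt (by norm_num) (by omega)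
  rw [h1]
  exact Int.emod_eq_of_lt (by omega) (by omega)

-- main characterisation: ripple borrow equals bit extraction of (value - 1) mod 2^n
theorem rippleA_eq_Tn (l : List Bool) :
    rippleA l = Tn l.length (((lsbVal l : Int) - 1) % (2 ^ l.length)) := by
  induction l with
  | nil => simp [rippleA, Tn]
  | cons b bs ih =>
      cases b
      · -- borrow propagates
        have e : (lsbVal (false :: bs) : Int) - 1 = 2 * (lsbVal bs : Int) - 1 := by
          simp only [lsbVal]; push_cast; ring
        have lhs : rippleA (false :: bs) = true :: rippleA bs := by simp [rippleA]
        rw [lhs, List.length_cons, e, emod_two_mul_add_one_pow, Tn_two_mul_add_one, ← ih]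
      · -- first one becomes zero, tail unchanged
        have e : (lsbVal (true :: bs) : Int) - 1 = 2 * (lsbVal bs : Int) := by
          simp only [lsbVal]; push_cast; ring
        have hr : (2 * (lsbVal bs : Int)) % (2 ^ (bs.length + 1)) = 2 * (lsbVal bs : Int) := by
          rw [emod_two_mul_pow]
          congr 1
          exact Int.emod_eq_of_lt (by positivity) (by exact_mod_cast lsbVal_lt bs)
        have lhs : rippleA (true :: bs) = false :: bs := by simp [rippleA]
        rw [lhs, List.length_cons, e, hr, Tn_two_mul, Tn_lsbVal]

theorem foldl_extract_eq_Tn (n : Nat) (r : Int) (acc : List Bool) :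
    ((List.range n).foldl
      (fun (st : List Bool × Int) _ => (st.1 ++ [PySem.Int.mod st.2 2 == 1], PySem.Int.floordiv st.2 2))
      (acc, r)).1 = acc ++ Tn n r := by
  induction n generalizing r acc with
  | zero => simp [Tn]
  | succ k ih =>
      rw [List.range_succ_eq_map, List.foldl_cons, List.foldl_map]
      rw [ih (PySem.Int.floordiv r 2) (acc ++ [PySem.Int.mod r 2 == 1])]
      rw [PySem.Int.floordiv_eq_ediv_of_pos (by norm_num), PySem.Int.mod_eq_emod_of_pos (by norm_num)]
      simp [Tn]

-- ===== VERDICT (by name: the statement is the Claim_ definition above) =====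
theorem binary_decrement_spec : Claim_equal_binary_decrement := by
  intro bitstr _
  unfold Spec_binary_decrement
  simp only [binary_decrement, binary_decrement_alt, foldl_eq_lsbVal_reverse]
  rw [PySem.Int.mod_eq_emod_of_pos (by positivity)]
  rw [foldl_extract_eq_Tn, List.nil_append]
  rw [show bitstr.length = bitstr.reverse.length from List.length_reverse.symm,
      ← rippleA_eq_Tn]
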